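-- pv_equiv track=rewrite | github.com/zilohumberto/collect-stock-info | collect_strategies/average.py | process
-- ===== SOURCE A (Python) =====
-- from typing import Any, Sequence, MutableMapping
--
-- def process(api_results: Sequence[MutableMapping[str, Any]]) -> MutableMapping[str, Any]:
--     cnt_dict = {}
--     if len(api_results) == 0:
--         return cnt_dict
--
--     for api_result in api_results:
--         for key, value in api_result.items():
--             if key not in cnt_dict:
--                 cnt_dict[key] = 0
--
--             cnt_dict[key] += value
--
--     return {key: int(value / len(api_results)) for key, value in cnt_dict.items()}
-- ===== SOURCE B (Python) =====
-- def process(api_results):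
--     n = len(api_results)
--     if n == 0:
--         return {}
--     keys = []
--     seen = set()
--     for api_result in api_results:
--         for key in api_result:
--             if key not in seen:
--                 seen.add(key)
--                 keys.append(key)
--     return {key: int(sum(d[key] for d in api_results if key in d) / n) for key in keys}
-- ===== Notes on version B (the rewrite author's own statement) =====
-- stated objective: alternative
-- what changed: B replaces A's single accumulating-dict pass with building the ordered universe of keys first and then, for each key, rescanning the whole list to sum d[key] over the dicts that contain it.
import Mathlib
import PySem

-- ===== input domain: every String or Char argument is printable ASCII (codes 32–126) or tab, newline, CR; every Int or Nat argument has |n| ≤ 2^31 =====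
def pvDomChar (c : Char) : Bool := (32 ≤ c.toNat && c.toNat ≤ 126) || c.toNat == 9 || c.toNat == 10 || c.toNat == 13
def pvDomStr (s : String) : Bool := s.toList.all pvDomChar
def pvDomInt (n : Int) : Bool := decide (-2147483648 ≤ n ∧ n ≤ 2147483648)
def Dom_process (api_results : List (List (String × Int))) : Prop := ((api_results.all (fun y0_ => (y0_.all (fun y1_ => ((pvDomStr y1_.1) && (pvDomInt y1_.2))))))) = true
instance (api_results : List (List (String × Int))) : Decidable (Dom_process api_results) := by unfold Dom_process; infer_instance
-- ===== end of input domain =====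

-- B replaces A's single accumulating-dict pass with a key-universe build followed by
-- per-key rescans of the whole list (alternative decomposition, not faster).

-- ===== PORT A =====
-- one iteration of A's inner loop body: 'if key not in cnt: cnt[key] = 0; cnt[key] += value'
def processStep (d : PySem.Dict String Int) (kv : String × Int) : PySem.Dict String Int :=
  let d1 := if d.contains kv.1 then d else d.insert kv.1 0
  d1.modify kv.1 0 (· + kv.2)

-- 'int(value / len(api_results))' is float division then truncation; PySem.Int.truncdiv is
-- exact for |value|, |len| < 2^53.
def process (api_results : List (List (String × Int))) : List (String × Int) :=
  if api_results.length = 0 then []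
  else
    let cnt := api_results.foldl (fun d api_result => api_result.foldl processStep d) PySem.Dict.empty
    cnt.items.map (fun kv => (kv.1, PySem.Int.truncdiv kv.2 (api_results.length : Int)))

-- ===== PORT B =====
def process_alt (api_results : List (List (String × Int))) : List (String × Int) :=
  let n : Int := (api_results.length : Int)
  if api_results.length = 0 then []
  else
    -- ordered distinct key universe (Source B's seen/keys loop)
    let keys : PySem.Set String :=
      api_results.foldl (fun s api_result =>
        api_result.foldl (fun s kv => PySem.Set.add s kv.1) s) PySem.Set.empty
    -- per-key rescan: sum(d[key] for d in api_results if key in d)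
    keys.map (fun k =>
      (k, PySem.Int.truncdiv
            (api_results.foldl (fun acc d =>
               if (PySem.Dict.mk d).contains k then acc + (PySem.Dict.mk d).getD k 0 else acc) 0)
            n))

-- ===== PRECONDITION & SPEC =====
-- Pre_ requires distinct keys within each inner association list: a Python dict cannot
-- contain a duplicate key, so this excludes only encodings no Python input can produce.
def Pre_process (api_results : List (List (String × Int))) : Prop :=
  ∀ d ∈ api_results, (d.map Prod.fst).Nodup
instance (api_results : List (List (String × Int))) : Decidable (Pre_process api_results) := by
  unfold Pre_process; infer_instance

def pvWitness_process : (List (List (String × Int))) :=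
  [[("a", 1)], [("a", 3), ("b", 2)]]

def Spec_process (api_results : List (List (String × Int))) (out : List (String × Int)) : Prop := out = process_alt api_results
instance (api_results : List (List (String × Int))) (out : List (String × Int)) : Decidable (Spec_process api_results out) := by unfold Spec_process; infer_instance

-- ===== CLAIM (what is proved, stated in full; the proofs are below) =====
def Claim_equal_process : Prop := ∀ (api_results : List (List (String × Int))), Dom_process api_results → Pre_process api_results → Spec_process api_results (process api_results)

-- ===== LEMMAS AND PROOFS =====

-- one A-step: lookup at any key k
theorem processStep_getD (d : PySem.Dict String Int) (p : String × Int) (k : String) :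
    (processStep d p).getD k 0 = d.getD k 0 + (if p.1 = k then p.2 else 0) := by
  unfold processStep
  rw [PySem.Dict.getD_modify]
  by_cases h : k = p.1
  · subst h
    rw [if_pos rfl, if_pos rfl]
    by_cases hc : d.contains p.1 = true
    · rw [if_pos hc]
    · rw [if_neg hc, PySem.Dict.getD_insert, if_pos rfl,
        PySem.Dict.getD_of_not_contains d 0 (by simpa using hc)]
  · by_cases hc : d.contains p.1 = true
    · rw [if_pos hc, if_neg h, if_neg (show ¬ p.1 = k from fun he => h he.symm), add_zero]
    · rw [if_neg hc, if_neg h, PySem.Dict.getD_insert, if_neg h,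
        if_neg (show ¬ p.1 = k from fun he => h he.symm), add_zero]

-- one A-step: keys
theorem processStep_keys (d : PySem.Dict String Int) (p : String × Int) :
    (processStep d p).keys = PySem.Set.add d.keys p.1 := by
  unfold processStep
  rw [PySem.Dict.keys_modify]
  by_cases hc : d.contains p.1 = true
  · have hm : p.1 ∈ d.keys := (PySem.Dict.contains_iff_mem_keys d p.1).1 hc
    rw [if_pos hc, PySem.Dict.keys_insert_of_contains d _ hc]
    simp [PySem.Set.add, hm]
  · have hm : p.1 ∉ d.keys := fun h => hc ((PySem.Dict.contains_iff_mem_keys d p.1).2 h)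
    rw [if_neg hc, PySem.Dict.insert_insert_self,
      PySem.Dict.keys_insert_of_not_contains d _ (by simpa using hc)]
    simp [PySem.Set.add, hm]

theorem fold_step_getD (l : List (String × Int)) (d : PySem.Dict String Int) (k : String) :
    (l.foldl processStep d).getD k 0
      = d.getD k 0 + ((l.filter (fun q => q.1 == k)).map Prod.snd).sum := by
  induction l generalizing d with
  | nil => simp
  | cons p t ih =>
      rw [List.foldl_cons, ih, processStep_getD, List.filter_cons]
      by_cases h : p.1 = k
      · simp only [h, beq_self_eq_true, if_true, List.map_cons, List.sum_cons]
        ring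
      · simp only [beq_iff_eq, h, if_false, add_zero]

theorem fold_step_keys (l : List (String × Int)) (d : PySem.Dict String Int) :
    (l.foldl processStep d).keys = l.foldl (fun s p => PySem.Set.add s p.1) d.keys := by
  induction l generalizing d with
  | nil => rfl
  | cons p t ih => rw [List.foldl_cons, ih, processStep_keys, List.foldl_cons]

theorem foldl_add_fst (l : List (String × Int)) (s : PySem.Set String) :
    l.foldl (fun s p => PySem.Set.add s p.1) s = PySem.Set.update s (l.map Prod.fst) := by
  induction l generalizing s with
  | nil => rfl
  | cons p t ih => rw [List.foldl_cons, ih, List.map_cons, PySem.Set.update_cons]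

-- per-dict contribution of B's rescan, under Nodup keys
theorem dict_contrib (d : List (String × Int)) (k : String) (hnd : (d.map Prod.fst).Nodup) :
    (if (PySem.Dict.mk d).contains k then (PySem.Dict.mk d).getD k 0 else 0)
      = ((d.filter (fun q => q.1 == k)).map Prod.snd).sum := by
  induction d with
  | nil => simp [PySem.Dict.contains_mk]
  | cons p t ih =>
      simp only [List.map_cons, List.nodup_cons] at hnd
      rw [List.filter_cons]
      by_cases h : p.1 = k
      · have hfilt : t.filter (fun q => q.1 == k) = [] := by
          refine List.filter_eq_nil_iff.2 (fun q hq => ?_)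
          simp only [beq_iff_eq]
          exact fun he => hnd.1 (by rw [h, ← he]; exact List.mem_map_of_mem hq)
        have hc : (PySem.Dict.mk (p :: t)).contains k = true := by
          simp [PySem.Dict.contains_mk, List.any_cons, h]
        rw [if_pos hc, PySem.Dict.getD_eq_get?_getD, PySem.Dict.get?_mk_cons,
          if_pos (by simpa using h)]
        simp [h, hfilt]
      · have hc : (PySem.Dict.mk (p :: t)).contains k = (PySem.Dict.mk t).contains k := by
          simp [PySem.Dict.contains_mk, List.any_cons, h]
        have hg : (PySem.Dict.mk (p :: t)).getD k 0 = (PySem.Dict.mk t).getD k 0 := by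
          rw [PySem.Dict.getD_eq_get?_getD, PySem.Dict.getD_eq_get?_getD,
            PySem.Dict.get?_mk_cons, if_neg (by simpa using h)]
        rw [hc, hg, ih hnd.2]
        simp [h]

-- B's per-key accumulating fold, written as a sum of per-dict contributions
theorem fold_if_add (L : List (List (String × Int))) (k : String) (a : Int) :
    L.foldl (fun acc d =>
        if (PySem.Dict.mk d).contains k then acc + (PySem.Dict.mk d).getD k 0 else acc) a
      = a + (L.map (fun d =>
          if (PySem.Dict.mk d).contains k then (PySem.Dict.mk d).getD k 0 else 0)).sum := by
  induction L generalizing a with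
  | nil => simp
  | cons d t ih =>
      rw [List.foldl_cons, List.map_cons, List.sum_cons, ih]
      by_cases h : (PySem.Dict.mk d).contains k = true
      · rw [if_pos h, if_pos h]; ring
      · rw [if_neg h, if_neg h, zero_add]

theorem process_eq (api_results : List (List (String × Int)))
    (hpre : Pre_process api_results) : process api_results = process_alt api_results := by
  unfold process process_alt
  by_cases hlen : api_results.length = 0
  · simp [hlen]
  · simp only [hlen, if_false]
    have hcnt : api_results.foldl (fun d api_result => api_result.foldl processStep d) PySem.Dict.empty
        = api_results.flatten.foldl processStep PySem.Dict.empty := List.foldl_flatten.symm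
    have hkeys : (api_results.foldl (fun d api_result => api_result.foldl processStep d)
          PySem.Dict.empty).keys
        = PySem.Set.ofList (api_results.flatten.map Prod.fst) := by
      rw [hcnt, fold_step_keys, foldl_add_fst, PySem.Dict.keys_empty,
        PySem.Set.update_nil_left]
    have hnodup : (api_results.foldl (fun d api_result => api_result.foldl processStep d)
          PySem.Dict.empty).keys.Nodup := by
      rw [hkeys]; exact PySem.Set.nodup_ofList _
    have hBkeys : api_results.foldl (fun s api_result =>
          api_result.foldl (fun s kv => PySem.Set.add s kv.1) s) PySem.Set.empty
        = PySem.Set.ofList (api_results.flatten.map Prod.fst) := by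
      rw [List.foldl_flatten.symm, foldl_add_fst]
      exact PySem.Set.update_nil_left _
    rw [hBkeys, PySem.Dict.items_eq_map_keys _ hnodup 0, List.map_map, hkeys]
    refine List.map_congr_left (fun k hk => ?_)
    simp only [Function.comp]
    congr 1
    rw [hcnt, fold_step_getD, fold_if_add]
    simp only [PySem.Dict.getD_empty, zero_add]
    rw [List.filter_flatten, List.map_flatten, List.sum_flatten]
    simp only [List.map_map]
    congr 1
    refine congrArg (List.sum (α := Int)) (List.map_congr_left (fun d hd => ?_))
    simp only [Function.comp]
    exact (dict_contrib d k (hpre d hd)).symm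

-- ===== VERDICT (by name: the statement is the Claim_ definition above) =====
theorem process_spec : Claim_equal_process := by
  intro api_results _ hpre
  unfold Spec_process
  exact process_eq api_results hpre
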